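-- pv_equiv track=rewrite | github.com/darinkirov/Programming-Fundamentals-with-Python | Data Types and Variables - Exercise/08_party_profit.py | calculate_coins
-- ===== SOURCE A (Python) =====
-- import math
--
-- def calculate_coins(group_size, days):
--     coins = 0
--     companions = group_size
--
--     for day in range(1, days + 1):
--         coins += 50 - 2 * companions
--
--         if day % 3 == 0:
--             coins -= 3 * companions
--
--         if day % 5 == 0:
--             coins += 20 * companions
--             if day % 3 == 0:
--                 coins -= 2 * companions
--
--         if day % 10 == 0:
--             companions -= 2
--
--         if day % 15 == 0:
--             companions += 5
--
--     coins_per_companion = math.floor(coins / group_size)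
--     return companions, coins_per_companion
-- ===== SOURCE B (Python) =====
-- import math
--
-- # prefix tables over one 30-day cycle (day mod 30):
-- # _SM[r] = sum of per-day coin multipliers m(d) for d = 1..r, where
-- #   m(d) = -2 - 3*[3|d] + 20*[5|d] - 2*[15|d]
-- # _SC[r] = sum of m(d) * off(d-1) for d = 1..r, where off(k) = -2*(k//10) + 5*(k//15)
-- _SM = [0, -2, -4, -9, -11, 7, 2, 0, -2, -7, 11, 9, 4, 2, 0, 13, 11, 9, 4, 2,
--        20, 15, 13, 11, 6, 24, 22, 17, 15, 13, 26]
-- _SC = [0, 0, 0, 0, 0, 0, 0, 0, 0, 0, 0, 4, 14, 18, 22, -4, -10, -16, -31, -37,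
--        17, 12, 10, 8, 3, 21, 19, 14, 12, 10, 23]
--
-- def calculate_coins(group_size, days):
--     n = max(days, 0)
--     q, r = divmod(n, 30)
--     coins = (50 * n
--              + group_size * (q * _SM[30] + _SM[r])
--              + q * _SC[30]
--              + 4 * _SM[30] * (q * (q - 1) // 2)
--              + _SC[r] + 4 * q * _SM[r])
--     companions = group_size - 2 * (n // 10) + 5 * (n // 15)
--     return companions, math.floor(coins / group_size)
-- ===== Notes on version B (the rewrite author's own statement) =====
-- stated objective: faster
-- what changed: B replaces the day-by-day simulation loop by an O(1) closed form: companion changes are periodic with period 30, so coins are computed from precomputed 30-day prefix tables plus an arithmetic series for the linear companion drift across full cycles.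
import Mathlib
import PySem

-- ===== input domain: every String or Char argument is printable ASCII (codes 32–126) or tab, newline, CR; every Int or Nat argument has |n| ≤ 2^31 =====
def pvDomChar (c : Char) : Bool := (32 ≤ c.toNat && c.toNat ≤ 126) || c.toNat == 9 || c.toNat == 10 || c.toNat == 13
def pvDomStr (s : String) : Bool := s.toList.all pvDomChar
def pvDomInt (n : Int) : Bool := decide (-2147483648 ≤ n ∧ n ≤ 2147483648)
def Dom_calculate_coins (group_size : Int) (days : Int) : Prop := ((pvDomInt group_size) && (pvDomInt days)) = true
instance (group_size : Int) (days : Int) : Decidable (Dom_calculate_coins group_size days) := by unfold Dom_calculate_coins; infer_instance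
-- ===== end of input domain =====

-- B replaces A's O(days) day-by-day simulation by an O(1) closed form over the periodic
-- 30-day cycle (prefix tables + arithmetic series for the companion drift); same values.

-- ===== PORT A =====
-- Shared helper: exact model of Python's `math.floor(a / b)` for ints a, b (b ≠ 0).
-- CPython's int / int is the correctly-rounded (nearest-even) binary64 quotient of the exact
-- rational a/b; we compute that rounding in exact integer arithmetic and take its floor.
-- Exact for all quotients in the normal binary64 range (always the case under Dom).
def pvRNDivFloor (s : Int) (A B : Nat) (t : Int) : Int :=
  let N := A * 2 ^ (max t 0).toNat
  let D := B * 2 ^ (max (-t) 0).toNat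
  let q := N / D
  let r := N % D
  let m : Nat := if 2 * r > D ∨ (2 * r = D ∧ q % 2 = 1) then q + 1 else q
  if t ≤ 0 then s * (m : Int) * 2 ^ (-t).toNat
  else PySem.Int.floordiv (s * (m : Int)) ((2 : Int) ^ t.toNat)

def pvFloatFloorDiv (a b : Int) : Int :=
  if a = 0 then 0
  else
    let s : Int := if a < 0 ↔ b < 0 then 1 else -1
    let A := a.natAbs
    let B := b.natAbs
    let t0 : Int := 52 - ((Nat.log2 A : Int) - (Nat.log2 B : Int))
    if (A * 2 ^ (max t0 0).toNat) / (B * 2 ^ (max (-t0) 0).toNat) < 2 ^ 52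
    then pvRNDivFloor s A B (t0 + 1) else pvRNDivFloor s A B t0

-- one iteration of A's `for day in range(1, days + 1)` loop; state = (coins, companions)
def pvCalcStep (st : Int × Int) (day : Int) : Int × Int :=
  let coins := st.1
  let companions := st.2
  let coins := coins + (50 - 2 * companions)
  let coins := if PySem.Int.mod day 3 = 0 then coins - 3 * companions else coins
  let coins :=
    if PySem.Int.mod day 5 = 0 then
      let c := coins + 20 * companions
      if PySem.Int.mod day 3 = 0 then c - 2 * companions else c
    else coins
  let companions := if PySem.Int.mod day 10 = 0 then companions - 2 else companions
  let companions := if PySem.Int.mod day 15 = 0 then companions + 5 else companions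
  (coins, companions)

def calculate_coins (group_size : Int) (days : Int) : List Int :=
  let st := (PySem.List.pyRange 1 (days + 1) 1).foldl pvCalcStep (0, group_size)
  [st.2, pvFloatFloorDiv st.1 group_size]

-- ===== PORT B =====
def pvSM : List Int := [0, -2, -4, -9, -11, 7, 2, 0, -2, -7, 11, 9, 4, 2, 0, 13, 11, 9, 4, 2,
                        20, 15, 13, 11, 6, 24, 22, 17, 15, 13, 26]
def pvSC : List Int := [0, 0, 0, 0, 0, 0, 0, 0, 0, 0, 0, 4, 14, 18, 22, -4, -10, -16, -31, -37,
                        17, 12, 10, 8, 3, 21, 19, 14, 12, 10, 23]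

def calculate_coins_alt (group_size : Int) (days : Int) : List Int :=
  let n := max days 0
  let q := PySem.Int.floordiv n 30
  let r := PySem.Int.mod n 30
  let coins := 50 * n
      + group_size * (q * PySem.List.pyGetD pvSM 30 0 + PySem.List.pyGetD pvSM r 0)
      + q * PySem.List.pyGetD pvSC 30 0
      + 4 * PySem.List.pyGetD pvSM 30 0 * PySem.Int.floordiv (q * (q - 1)) 2
      + PySem.List.pyGetD pvSC r 0 + 4 * q * PySem.List.pyGetD pvSM r 0
  let companions := group_size - 2 * PySem.Int.floordiv n 10 + 5 * PySem.Int.floordiv n 15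
  [companions, pvFloatFloorDiv coins group_size]

-- ===== PRECONDITION & SPEC =====
-- A divides by group_size at the end (ZeroDivisionError when group_size = 0); excluded.
def Pre_calculate_coins (group_size : Int) (days : Int) : Prop := group_size ≠ 0
instance (group_size : Int) (days : Int) : Decidable (Pre_calculate_coins group_size days) := by unfold Pre_calculate_coins; infer_instance
def pvWitness_calculate_coins : Int × Int := (5, 14)

def Spec_calculate_coins (group_size : Int) (days : Int) (out : List Int) : Prop := out = calculate_coins_alt group_size days
instance (group_size : Int) (days : Int) (out : List Int) : Decidable (Spec_calculate_coins group_size days out) := by unfold Spec_calculate_coins; infer_instance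

-- ===== CLAIM (what is proved, stated in full; the proofs are below) =====
def Claim_equal_calculate_coins : Prop := ∀ (group_size : Int) (days : Int), Dom_calculate_coins group_size days → Pre_calculate_coins group_size days → Spec_calculate_coins group_size days (calculate_coins group_size days)

-- ===== LEMMAS AND PROOFS =====

-- companion offset after r days of a cycle: off(r) = -2*(r//10) + 5*(r//15), recursively
def pvOFF : Nat → Int
  | 0 => 0
  | r + 1 => (if (r + 1) % 10 = 0 then pvOFF r - 2 else pvOFF r) + (if (r + 1) % 15 = 0 then 5 else 0)

-- per-day coin multiplier m(d): coins gained on day d are 50 + m(d) * companions(d)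
def pvMC (d : Nat) : Int :=
  (-2) + (if d % 3 = 0 then -3 else 0) + (if d % 5 = 0 then 20 + (if d % 3 = 0 then -2 else 0) else 0)

def pvSMf : Nat → Int
  | 0 => 0
  | r + 1 => pvSMf r + pvMC (r + 1)

def pvSCf : Nat → Int
  | 0 => 0
  | r + 1 => pvSCf r + pvMC (r + 1) * pvOFF r

lemma pvBlock (c0 comp0 : Int) (s : Nat) (hs : 30 ∣ s) :
    ∀ r : Nat, r ≤ 30 →
      ((List.range r).map (fun i => (1 : Int) + ((s + i : Nat) : Int))).foldl pvCalcStep (c0, comp0)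
        = (c0 + 50 * r + comp0 * pvSMf r + pvSCf r, comp0 + pvOFF r) := by
  intro r
  induction r with
  | zero => intro _; simp [pvSMf, pvSCf, pvOFF]
  | succ r ih =>
    intro hr
    obtain ⟨k, rfl⟩ := hs
    rw [List.range_succ, List.map_append, List.foldl_append, ih (by omega)]
    have h3 : (PySem.Int.mod ((1 : Int) + ((30 * k + r : Nat) : Int)) 3 = 0) ↔ ((r + 1) % 3 = 0) := by
      rw [PySem.Int.mod_eq_emod_of_pos (by norm_num : (0:Int) < 3)]; push_cast; omega
    have h5 : (PySem.Int.mod ((1 : Int) + ((30 * k + r : Nat) : Int)) 5 = 0) ↔ ((r + 1) % 5 = 0) := by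
      rw [PySem.Int.mod_eq_emod_of_pos (by norm_num : (0:Int) < 5)]; push_cast; omega
    have h10 : (PySem.Int.mod ((1 : Int) + ((30 * k + r : Nat) : Int)) 10 = 0) ↔ ((r + 1) % 10 = 0) := by
      rw [PySem.Int.mod_eq_emod_of_pos (by norm_num : (0:Int) < 10)]; push_cast; omega
    have h15 : (PySem.Int.mod ((1 : Int) + ((30 * k + r : Nat) : Int)) 15 = 0) ↔ ((r + 1) % 15 = 0) := by
      rw [PySem.Int.mod_eq_emod_of_pos (by norm_num : (0:Int) < 15)]; push_cast; omega
    simp only [List.foldl_cons, List.foldl_nil, List.map_cons, List.map_nil,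
      pvCalcStep, pvSMf, pvSCf, pvOFF, pvMC, h3, h5, h10, h15, Prod.mk.injEq]
    constructor <;> (split_ifs <;> push_cast <;> ring)

lemma pvCycles (G : Int) : ∀ q : Nat,
    ((List.range (30 * q)).map (fun i : Nat => (1 : Int) + (i : Int))).foldl pvCalcStep (0, G)
      = (1500 * (q : Int) + 26 * G * q + 23 * q + 52 * q * ((q : Int) - 1), G + 4 * q) := by
  intro q
  induction q with
  | zero => simp
  | succ q ih =>
    rw [show 30 * (q + 1) = 30 * q + 30 from by ring, List.range_add, List.map_append,
      List.foldl_append, ih, List.map_map]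
    rw [show ((fun i : Nat => (1 : Int) + (i : Int)) ∘ (fun i => 30 * q + i))
        = (fun i : Nat => (1 : Int) + ((30 * q + i : Nat) : Int)) from rfl]
    rw [pvBlock _ _ (30 * q) ⟨q, rfl⟩ 30 le_rfl]
    rw [show pvSMf 30 = 26 from by decide, show pvSCf 30 = 23 from by decide,
      show pvOFF 30 = 4 from by decide]
    refine Prod.ext ?_ ?_ <;> push_cast <;> ring

lemma pvTab : ∀ r : Nat, r < 31 →
    PySem.List.pyGetD pvSM ((r : Nat) : Int) 0 = pvSMf r ∧
    PySem.List.pyGetD pvSC ((r : Nat) : Int) 0 = pvSCf r ∧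
    pvOFF r = -2 * ((r / 10 : Nat) : Int) + 5 * ((r / 15 : Nat) : Int) := by decide

-- ===== VERDICT (by name: the statement is the Claim_ definition above) =====
theorem calculate_coins_spec : Claim_equal_calculate_coins := by
  intro G days _ _
  simp only [Spec_calculate_coins, calculate_coins, calculate_coins_alt]
  by_cases hd : days ≤ 0
  · rw [PySem.List.pyRange_one_eq_nil (by omega), show max days 0 = 0 from by omega]
    simp only [List.foldl_nil]
    norm_num [PySem.Int.floordiv, PySem.Int.mod, pvSM, pvSC, PySem.List.pyGetD]
  · obtain ⟨n, rfl⟩ : ∃ n : Nat, days = (n : Int) := ⟨days.toNat, (Int.toNat_of_nonneg (by omega)).symm⟩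
    have hq : n = 30 * (n / 30) + n % 30 := (Nat.div_add_mod n 30).symm
    have hr : n % 30 < 30 := Nat.mod_lt _ (by norm_num)
    rw [PySem.List.pyRange_one, show ((n : Int) + 1 - 1).toNat = n from by omega]
    rw [show List.range n
          = List.range (30 * (n / 30)) ++ (List.range (n % 30)).map (fun i => 30 * (n / 30) + i) from by
        rw [← List.range_add]; exact congrArg _ hq]
    rw [List.map_append, List.foldl_append, List.map_map]
    rw [show ((fun k : Nat => (1 : Int) + (k : Int)) ∘ (fun i => 30 * (n / 30) + i))
          = (fun i : Nat => (1 : Int) + ((30 * (n / 30) + i : Nat) : Int)) from rfl]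
    rw [pvCycles, pvBlock _ _ (30 * (n / 30)) ⟨n / 30, rfl⟩ _ hr.le]
    rw [show max ((n : Int)) 0 = (n : Int) from by omega]
    rw [show PySem.List.pyGetD pvSM (30 : Int) 0 = 26 from by decide,
        show PySem.List.pyGetD pvSC (30 : Int) 0 = 23 from by decide]
    rw [show PySem.Int.floordiv (n : Int) 30 = ((n / 30 : Nat) : Int) from by
          rw [PySem.Int.floordiv_eq_ediv_of_pos (by norm_num)]; omega,
        show PySem.Int.mod (n : Int) 30 = ((n % 30 : Nat) : Int) from by
          rw [PySem.Int.mod_eq_emod_of_pos (by norm_num : (0:Int) < 30)]; omega,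
        show PySem.Int.floordiv (n : Int) 10 = ((n / 10 : Nat) : Int) from by
          rw [PySem.Int.floordiv_eq_ediv_of_pos (by norm_num)]; omega,
        show PySem.Int.floordiv (n : Int) 15 = ((n / 15 : Nat) : Int) from by
          rw [PySem.Int.floordiv_eq_ediv_of_pos (by norm_num)]; omega]
    obtain ⟨hSM, hSC, hOFF⟩ := pvTab (n % 30) (by omega)
    rw [hSM, hSC, hOFF]
    obtain ⟨k, hk⟩ := Int.even_mul_succ_self (((n / 30 : Nat) : Int) - 1)
    have hk' : ((n / 30 : Nat) : Int) * (((n / 30 : Nat) : Int) - 1) = 2 * k := by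
      linear_combination hk
    have hfd : PySem.Int.floordiv (((n / 30 : Nat) : Int) * (((n / 30 : Nat) : Int) - 1)) 2 = k := by
      rw [hk', PySem.Int.floordiv_eq_ediv_of_pos (by norm_num)]; omega
    rw [hfd]
    have h10 : n / 10 = 3 * (n / 30) + (n % 30) / 10 := by omega
    have h15 : n / 15 = 2 * (n / 30) + (n % 30) / 15 := by omega
    have hnc : (n : Int) = 30 * ((n / 30 : Nat) : Int) + ((n % 30 : Nat) : Int) := by
      exact_mod_cast congrArg (Nat.cast : Nat → Int) hq
    refine List.ext_getElem (by simp) ?_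
    intro i hi _
    match i, hi with
    | 0, _ =>
      simp only [List.getElem_cons_zero]
      rw [h10, h15]; push_cast; omega
    | 1, _ =>
      simp only [List.getElem_cons_succ, List.getElem_cons_zero]
      congr 1
      rw [hnc]; push_cast at hk' ⊢; linear_combination (52:ℤ) * hk'
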